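-- pv_equiv track=rewrite | github.com/BreizhCTF/breizhctf-2023 | challenges/mobile/love_death_robots/solve.py | _str2vec
-- ===== SOURCE A (Python) =====
-- import math
--
-- def _str2vec(value, l=4):
--     """
--     Encodes a binary string as a vector.  The string is split into chunks of length l and each chunk is encoded as 2
--     elements in the return value.
--
--     Compliment of _str2vec.
--     :param value:
--         A binary string to encode.
--     :param l:
--         An optional length value of chunks.
--     :return:
--         A vector containing ceil(n / l) elements where n is the length of the value parameter.
--     """
--     n = len(value)
--
--     # Split the string into chunks
--     num_chunks = math.ceil(n / l)
--     chunks = [value[l * i:l * (i + 1)]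
--               for i in range(num_chunks)]
--     d = [sum([character << 8 * j
--                  for j, character in enumerate(chunk)])
--             for chunk in chunks]
--     return d
-- ===== SOURCE B (Python) =====
-- def _str2vec(value, l=4):
--     # One streaming pass: accumulate the current chunk's weighted sum and flush on chunk boundaries.
--     if l <= 0:
--         return []
--     d = []
--     cur = 0
--     j = 0
--     for c in value:
--         cur += c << (8 * j)
--         j += 1
--         if j == l:
--             d.append(cur)
--             cur = 0
--             j = 0
--     if j:
--         d.append(cur)
--     return d
-- ===== Notes on version B (the rewrite author's own statement) =====
-- stated objective: alternative
-- what changed: Replaces building a list of chunk slices plus a nested per-chunk enumerate/sum comprehension by a single streaming pass that keeps a running weighted sum and within-chunk counter and flushes on chunk boundaries.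
-- outside the precondition, e.g. on _str2vec([1], 0): A raises ZeroDivisionError, B returns []
import Mathlib
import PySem

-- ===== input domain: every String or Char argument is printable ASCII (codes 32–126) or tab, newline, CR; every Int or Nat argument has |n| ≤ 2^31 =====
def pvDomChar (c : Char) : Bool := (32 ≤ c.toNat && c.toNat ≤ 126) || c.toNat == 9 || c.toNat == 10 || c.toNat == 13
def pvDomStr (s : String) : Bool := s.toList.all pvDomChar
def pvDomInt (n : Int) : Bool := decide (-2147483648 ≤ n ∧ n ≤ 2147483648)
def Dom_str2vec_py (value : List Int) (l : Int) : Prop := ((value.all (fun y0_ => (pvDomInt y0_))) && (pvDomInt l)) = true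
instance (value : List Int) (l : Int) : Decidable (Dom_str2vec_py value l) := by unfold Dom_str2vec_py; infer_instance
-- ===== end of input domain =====

-- B replaces A's chunk-slice list + nested per-chunk comprehension by one streaming pass with a
-- running weighted sum flushed at chunk boundaries (objective: alternative decomposition, same cost).

-- ===== PORT A =====
-- math.ceil(n / l) is ported as exact ceiling division -((-n) // l); exact for the list lengths
-- and |l| ≤ 2^31 admitted here (the float quotient n/l is exact enough to round identically).
def str2vec_py (value : List Int) (l : Int) : List Int :=
  let n : Int := value.length
  let num_chunks : Int := -(PySem.Int.floordiv (-n) l)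
  let chunks : List (List Int) :=
    (PySem.List.pyRange 0 num_chunks 1).map
      (fun i => PySem.List.slice value (some (l * i)) (some (l * (i + 1))))
  chunks.map (fun chunk =>
    ((PySem.List.enumerate chunk 0).map (fun jc => jc.2 <<< (8 * jc.1).toNat)).sum)

-- ===== PORT B =====
def str2vec_py_alt (value : List Int) (l : Int) : List Int :=
  if l ≤ 0 then []
  else
    let s := value.foldl
      (fun (s : List Int × Int × Int) (c : Int) =>
        let cur := s.2.1 + (c <<< (8 * s.2.2).toNat)
        let j := s.2.2 + 1
        if j = l then (s.1 ++ [cur], 0, 0) else (s.1, cur, j))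
      ([], 0, 0)
    if s.2.2 ≠ 0 then s.1 ++ [s.2.1] else s.1

-- ===== PRECONDITION & SPEC =====
-- Pre_ excludes only l = 0, where Python A raises ZeroDivisionError.
def Pre_str2vec_py (value : List Int) (l : Int) : Prop := l ≠ 0
instance (value : List Int) (l : Int) : Decidable (Pre_str2vec_py value l) := by unfold Pre_str2vec_py; infer_instance
def pvWitness_str2vec_py : List Int × Int := ([1, 2, 3, 4, 5], 4)

def Spec_str2vec_py (value : List Int) (l : Int) (out : List Int) : Prop := out = str2vec_py_alt value l
instance (value : List Int) (l : Int) (out : List Int) : Decidable (Spec_str2vec_py value l out) := by unfold Spec_str2vec_py; infer_instance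

-- ===== CLAIM (what is proved, stated in full; the proofs are below) =====
def Claim_equal_str2vec_py : Prop := ∀ (value : List Int) (l : Int), Dom_str2vec_py value l → Pre_str2vec_py value l → Spec_str2vec_py value l (str2vec_py value l)

-- ===== LEMMAS AND PROOFS =====

-- little-endian weighted sum of a chunk, weights starting at byte position j
def wsum : List Int → Nat → Int
  | [], _ => 0
  | c :: cs, j => c * 2 ^ (8 * j) + wsum cs (j + 1)

-- recursive chunking reference: both ports are proved equal to this for l ≥ 1
def chunkRec (L : Nat) : List Int → List Int
  | [] => []
  | c :: cs => wsum (c :: cs.take (L - 1)) 0 :: chunkRec L (cs.drop (L - 1))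
termination_by v => v.length
decreasing_by simp only [List.length_drop, List.length_cons]; omega

lemma chunkRec_nil (L : Nat) : chunkRec L [] = [] := by rw [chunkRec]

lemma chunkRec_cons (L : Nat) (c : Int) (cs : List Int) :
    chunkRec L (c :: cs) = wsum (c :: cs.take (L - 1)) 0 :: chunkRec L (cs.drop (L - 1)) := by
  rw [chunkRec]

-- partially filled chunk state reached by B's streaming pass
def partRec (L : Nat) (cur : Int) (j : Nat) (v : List Int) : List Int :=
  if v = [] ∧ j = 0 then []
  else (cur + wsum (v.take (L - j)) j) :: chunkRec L (v.drop (L - j))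

lemma wsum_enum (chunk : List Int) : ∀ (j : Nat),
    ((PySem.List.enumerate chunk (j : Int)).map (fun jc => jc.2 <<< (8 * jc.1).toNat)).sum
      = wsum chunk j := by
  induction chunk with
  | nil => intro j; simp [PySem.List.enumerate, wsum]
  | cons c cs ih =>
    intro j
    have h1 : ((j : Int) + 1) = ((j + 1 : Nat) : Int) := by push_cast; ring
    have h2 : (8 * (j : Int)).toNat = 8 * j := by omega
    rw [PySem.List.enumerate_cons]
    simp only [List.map_cons, List.sum_cons, h1, ih (j + 1)]
    simp [wsum, h2, Int.shiftLeft_eq]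

lemma partRec_step (L : Nat) (cur c : Int) (j : Nat) (cs : List Int) (h : j + 1 < L) :
    partRec L (cur + c * 2 ^ (8 * j)) (j + 1) cs = partRec L cur j (c :: cs) := by
  have hk : L - j = (L - (j + 1)) + 1 := by omega
  simp only [partRec, hk, List.take_succ_cons, List.drop_succ_cons, wsum]
  rw [if_neg (by simp), if_neg (by simp)]
  congr 1
  ring

lemma partRec_zero (L : Nat) (hL : 1 ≤ L) (v : List Int) : partRec L 0 0 v = chunkRec L v := by
  cases v with
  | nil => simp [partRec, chunkRec_nil]
  | cons c cs =>
    simp only [partRec, chunkRec_cons]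
    have h : L - 0 = (L - 1) + 1 := by omega
    simp [h]

lemma ceil_pred (n l : Int) (hl : 0 < l) (hn : 0 < n) :
    -(PySem.Int.floordiv (-(n - l)) l) = -(PySem.Int.floordiv (-n) l) - 1 := by
  have h := (PySem.Int.neg_floordiv_neg_eq_iff_of_pos (a := n) (b := l)
    (q := -(PySem.Int.floordiv (-n) l)) hl).mp rfl
  exact (PySem.Int.neg_floordiv_neg_eq_iff_of_pos hl).mpr (by constructor <;> nlinarith [h.1, h.2])

lemma ceil_pos (n l : Int) (hl : 0 < l) (hn : 0 < n) : 0 < -(PySem.Int.floordiv (-n) l) := by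
  have h := (PySem.Int.neg_floordiv_neg_eq_iff_of_pos (a := n) (b := l)
    (q := -(PySem.Int.floordiv (-n) l)) hl).mp rfl
  nlinarith [h.1, h.2]

lemma ceil_nonpos (n l : Int) (hl : l < 0) (hn : 0 ≤ n) : -(PySem.Int.floordiv (-n) l) ≤ 0 := by
  have h1 := PySem.Int.floordiv_mul_add_mod (-n) l
  have h2 := PySem.Int.mod_neg_bounds (a := -n) hl
  nlinarith [h1, h2.1, h2.2]

-- the inner comprehension of A computes wsum
lemma inner_eq_wsum (chunk : List Int) :
    ((PySem.List.enumerate chunk 0).map (fun jc => jc.2 <<< (8 * jc.1).toNat)).sum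
      = wsum chunk 0 := by
  have := wsum_enum chunk 0
  simpa using this

lemma slice_shift (v : List Int) (L k : Nat) :
    PySem.List.slice v (some ((L : Int) * ((k : Int) + 1))) (some ((L : Int) * ((k : Int) + 2)))
      = PySem.List.slice (v.drop L) (some ((L : Int) * (k : Int))) (some ((L : Int) * ((k : Int) + 1))) := by
  have e1 : (L : Int) * ((k : Int) + 1) = ((L * (k + 1) : Nat) : Int) := by push_cast; ring
  have e2 : (L : Int) * ((k : Int) + 2) = ((L * (k + 2) : Nat) : Int) := by push_cast; ring
  have e3 : (L : Int) * (k : Int) = ((L * k : Nat) : Int) := by push_cast; ring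
  rw [e1, e2, e3, PySem.List.slice_natCast, PySem.List.slice_natCast, List.drop_drop]
  have a1 : L * (k + 2) - L * (k + 1) = L := by rw [← Nat.mul_sub]; simp
  have a2 : L * (k + 1) - L * k = L := by rw [← Nat.mul_sub]; simp
  have a3 : L + L * k = L * (k + 1) := by ring
  rw [a1, a2, a3]

-- A equals chunkRec for positive chunk length
lemma A_char (L : Nat) (hL : 1 ≤ L) : ∀ (v : List Int), str2vec_py v (L : Int) = chunkRec L v := by
  intro v
  induction hv : v.length using Nat.strong_induction_on generalizing v with
  | _ m ih =>
  cases v with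
  | nil =>
    simp [str2vec_py, PySem.Int.floordiv, chunkRec_nil]
  | cons c cs =>
    subst hv
    have hl0 : (0 : Int) < (L : Int) := by exact_mod_cast hL
    have hn : (0 : Int) < (((c :: cs).length : Nat) : Int) := by exact_mod_cast Nat.succ_pos cs.length
    -- the chunk count q and its recurrence
    set n : Int := (((c :: cs).length : Nat) : Int) with hn_def
    set q : Int := -(PySem.Int.floordiv (-n) (L : Int)) with hq_def
    have hq := (PySem.Int.neg_floordiv_neg_eq_iff_of_pos (a := n) (b := (L : Int)) (q := q) hl0).mp rfl
    have hqpos : 0 < q := ceil_pos n (L : Int) hl0 hn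
    have hlen' : (cs.drop (L - 1)).length = (c :: cs).length - L := by simp; omega
    have hq' : -(PySem.Int.floordiv (-(((cs.drop (L - 1)).length : Nat) : Int)) (L : Int)) = q - 1 := by
      by_cases hbig : L ≤ (c :: cs).length
      · have e : (((cs.drop (L - 1)).length : Nat) : Int) = n - (L : Int) := by
          rw [hlen']; omega
        rw [e]; exact ceil_pred n (L : Int) hl0 hn
      · have e : (((cs.drop (L - 1)).length : Nat) : Int) = 0 := by
          rw [hlen']; omega
        rw [e]
        have hq1 : q = 1 := by
          apply (PySem.Int.neg_floordiv_neg_eq_iff_of_pos (a := n) (b := (L : Int)) hl0).mpr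
          constructor
          · simpa using hn
          · rw [one_mul]; omega
        simp [PySem.Int.floordiv, hq1]
    have hih : str2vec_py (cs.drop (L - 1)) (L : Int) = chunkRec L (cs.drop (L - 1)) := by
      apply ih (cs.drop (L - 1)).length _ _ rfl
      simp only [List.length_drop, List.length_cons]; omega
    -- unfold A on both v and its tail
    simp only [str2vec_py] at hih ⊢
    rw [PySem.List.pyRange_one, ← hq_def] at *
    rw [hq'] at hih
    have hqt : (q - 0).toNat = (q - 1 - 0).toNat + 1 := by omega
    rw [hqt, List.range_succ_eq_map]
    simp only [List.map_cons, List.map_map, chunkRec_cons]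
    congr 1
    · -- head chunk
      norm_num
      rw [inner_eq_wsum, show List.take L (c :: cs) = c :: List.take (L - 1) cs by
        cases L with | zero => omega | succ L' => simp]
    · -- tail chunks
      rw [← hih]
      simp only [List.map_map]
      apply List.map_congr_left
      intro k _
      simp only [Function.comp]
      have es : (0 : Int) + (Nat.succ k : Nat) = (k : Int) + 1 := by push_cast; ring
      have e1 : (0 : Int) + (k : Nat) = (k : Int) := by ring
      rw [es, e1]
      have := slice_shift (c :: cs) L k
      rw [show ((k : Int) + 1 + 1) = ((k : Int) + 2) by ring, this,
          show (c :: cs).drop L = cs.drop (L - 1) by cases L with | zero => omega | succ L' => simp]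

-- B's fold maintains partRec
lemma B_inv (L : Nat) (hL : 1 ≤ L) : ∀ (v d : List Int) (cur : Int) (j : Nat), j < L →
    (let s := v.foldl
        (fun (s : List Int × Int × Int) (c : Int) =>
          let cur := s.2.1 + (c <<< (8 * s.2.2).toNat)
          let j := s.2.2 + 1
          if j = (L : Int) then (s.1 ++ [cur], 0, 0) else (s.1, cur, j))
        (d, cur, (j : Int))
      if s.2.2 ≠ 0 then s.1 ++ [s.2.1] else s.1)
      = d ++ partRec L cur j v := by
  intro v
  induction v with
  | nil =>
    intro d cur j hj
    cases j with
    | zero => simp [partRec]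
    | succ j' => simp [partRec, wsum, chunkRec_nil, show ((j' : Int) + 1) ≠ 0 by omega]
  | cons c cs ih =>
    intro d cur j hj
    have h2 : (8 * (j : Int)).toNat = 8 * j := by omega
    simp only [List.foldl_cons]
    by_cases hje : ((j : Int) + 1) = (L : Int)
    · have hjL : j + 1 = L := by exact_mod_cast hje
      rw [if_pos hje]
      have hih := ih (d ++ [cur + (c <<< (8 * (j : Int)).toNat)]) 0 0 (by omega)
      simp only [Nat.cast_zero] at hih
      rw [hih, partRec_zero L hL cs, List.append_assoc]
      have hLj : L - j = 1 := by omega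
      simp [partRec, hLj, wsum, Int.shiftLeft_eq, h2]
    · have hjL : j + 1 < L := by
        have : j + 1 ≠ L := by intro h; exact hje (by exact_mod_cast h)
        omega
      rw [if_neg hje]
      have h1 : ((j : Int) + 1) = ((j + 1 : Nat) : Int) := by push_cast; ring
      rw [h1]
      rw [ih d (cur + (c <<< (8 * (j : Int)).toNat)) (j + 1) hjL]
      rw [Int.shiftLeft_eq, h2, partRec_step L cur c j cs hjL]

-- ===== VERDICT (by name: the statement is the Claim_ definition above) =====
theorem str2vec_py_spec : Claim_equal_str2vec_py := by
  intro value l _dom hpre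
  unfold Spec_str2vec_py
  rcases lt_trichotomy l 0 with hl | hl | hl
  · -- negative l: A's range is empty, B's guard fires
    have hq : -(PySem.Int.floordiv (-(value.length : Int)) l) ≤ 0 :=
      ceil_nonpos _ _ hl (by positivity)
    simp [str2vec_py, str2vec_py_alt, le_of_lt hl,
      PySem.List.pyRange_one_eq_nil (by omega : -(PySem.Int.floordiv (-(value.length : Int)) l) ≤ 0)]
  · exact absurd hl hpre
  · -- positive l
    have hL : l = ((l.toNat : Nat) : Int) := by omega
    have h1 : 1 ≤ l.toNat := by omega
    rw [hL, A_char l.toNat h1 value]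
    have hB := B_inv l.toNat h1 value [] 0 0 (by omega)
    simp only [Nat.cast_zero] at hB
    rw [str2vec_py_alt]
    simp only [if_neg (by omega : ¬ ((l.toNat : Int) ≤ 0))]
    rw [hB, partRec_zero l.toNat h1]
    simp
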